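-- pv_equiv track=rewrite | github.com/lamini-H/ExamsQuestions | OneDrive/Desktop/python_MP/2019Questions.py | studen_mode
-- ===== SOURCE A (Python) =====
-- def find_mode(mylist):
--      max = 0
--      for i in range(len(mylist)):
--           if mylist.count(mylist[i]) > max:
--                max=mylist.count(mylist[i])
--                mode = mylist[i]
--      return mode
--
-- def studen_mode(mylist):
--      modes = []
--      for i in range(len(mylist[0])):
--           temp_column = []
--           for j in range(len(mylist)):
--                temp_column.append(mylist[j][i] )
--           modes.append(find_mode(temp_column))
--      return modes
-- ===== SOURCE B (Python) =====
-- def studen_mode(mylist):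
--     num_cols = len(mylist[0])
--     counts = [{} for _ in range(num_cols)]
--     for row in mylist:
--         for i in range(num_cols):
--             x = row[i]
--             counts[i][x] = counts[i].get(x, 0) + 1
--     modes = []
--     for c in counts:
--         best_cnt = 0
--         best_key = None
--         for k, v in c.items():
--             if v > best_cnt:
--                 best_cnt = v
--                 best_key = k
--         modes.append(best_key)
--     return modes
-- ===== Notes on version B (the rewrite author's own statement) =====
-- stated objective: faster
-- what changed: A rebuilds each column and finds its mode by calling list.count for every element (a quadratic scan per column); B makes one row-major pass that accumulates a per-column count dictionary, then a separate select pass takes each column's first key with the strictly maximal count, preserving A's first-appearance tie-break.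
import Mathlib
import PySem

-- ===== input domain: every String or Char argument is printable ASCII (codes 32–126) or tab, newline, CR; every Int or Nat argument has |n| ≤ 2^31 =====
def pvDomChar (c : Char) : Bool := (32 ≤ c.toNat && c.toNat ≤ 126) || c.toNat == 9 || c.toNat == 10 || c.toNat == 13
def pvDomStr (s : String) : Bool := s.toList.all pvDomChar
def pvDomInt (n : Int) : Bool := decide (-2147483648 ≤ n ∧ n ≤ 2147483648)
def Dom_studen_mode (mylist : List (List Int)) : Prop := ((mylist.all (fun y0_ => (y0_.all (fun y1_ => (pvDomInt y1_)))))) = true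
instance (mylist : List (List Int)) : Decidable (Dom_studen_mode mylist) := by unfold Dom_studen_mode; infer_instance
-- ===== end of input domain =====

-- B replaces A's per-column rebuild + quadratic count-scan mode by a single row-major
-- counting pass into one hash table per column followed by a select pass (objective: faster).

-- ===== PORT A =====
-- find_mode: 'mode' is unbound when the list is empty (UnboundLocalError); that case is
-- unreachable from studen_mode under Pre_; the port returns 0 there.
def find_mode (mylist : List Int) : Int :=
  let r := (PySem.List.pyRange 0 (mylist.length : Int) 1).foldl
    (fun (s : Int × Option Int) i =>
      let x := PySem.List.pyGetD mylist i 0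
      if (List.count x mylist : Int) > s.1 then ((List.count x mylist : Int), some x) else s)
    (0, (none : Option Int))
  r.2.getD 0

-- indexing mylist[0] / mylist[j][i] raises IndexError outside Pre_; total pyGetD forms, exact under Pre_
def studen_mode (mylist : List (List Int)) : List Int :=
  (PySem.List.pyRange 0 ((PySem.List.pyGetD mylist 0 []).length : Int) 1).foldl
    (fun modes i =>
      let temp_column := (PySem.List.pyRange 0 (mylist.length : Int) 1).foldl
        (fun col j => col ++ [PySem.List.pyGetD (PySem.List.pyGetD mylist j []) i 0]) []
      modes ++ [find_mode temp_column]) []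

-- ===== PORT B =====
-- row[i] raises IndexError outside Pre_ (total pyGetD form, exact under Pre_); best_key is
-- None only for an empty column table, unreachable under Pre_: the port returns 0 there.
def studen_mode_alt (mylist : List (List Int)) : List Int :=
  let numCols : Int := ((PySem.List.pyGetD mylist 0 []).length : Int)
  let counts0 : List (PySem.Dict Int Int) :=
    (PySem.List.pyRange 0 numCols 1).map (fun _ => PySem.Dict.empty)
  let counts := mylist.foldl
    (fun cs row =>
      (PySem.List.pyRange 0 numCols 1).foldl
        (fun cs i =>
          let x := PySem.List.pyGetD row i 0
          PySem.List.pySetD cs i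
            ((PySem.List.pyGetD cs i PySem.Dict.empty).insert x
              ((PySem.List.pyGetD cs i PySem.Dict.empty).getD x 0 + 1))) cs)
    counts0
  counts.foldl
    (fun modes c =>
      let r := c.items.foldl
        (fun (s : Int × Option Int) kv => if kv.2 > s.1 then (kv.2, some kv.1) else s)
        (0, (none : Option Int))
      modes ++ [r.2.getD 0]) []

-- ===== PRECONDITION & SPEC =====
-- Pre_ excludes exactly the inputs where Python A raises: the empty matrix (IndexError on
-- mylist[0]) and matrices with a row shorter than the first row (IndexError on mylist[j][i]).
def Pre_studen_mode (mylist : List (List Int)) : Prop :=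
  mylist ≠ [] ∧ ∀ row ∈ mylist, (mylist.headI).length ≤ row.length
instance (mylist : List (List Int)) : Decidable (Pre_studen_mode mylist) := by
  unfold Pre_studen_mode; infer_instance
def pvWitness_studen_mode : List (List Int) := [[1, 2], [1, 3]]

def Spec_studen_mode (mylist : List (List Int)) (out : List Int) : Prop := out = studen_mode_alt mylist
instance (mylist : List (List Int)) (out : List Int) : Decidable (Spec_studen_mode mylist out) := by unfold Spec_studen_mode; infer_instance

-- ===== CLAIM (what is proved, stated in full; the proofs are below) =====
def Claim_equal_studen_mode : Prop := ∀ (mylist : List (List Int)), Dom_studen_mode mylist → Pre_studen_mode mylist → Spec_studen_mode mylist (studen_mode mylist)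

-- ===== LEMMAS AND PROOFS =====

-- the common "first strict-maximum" selection step, with counts taken in the fixed list l
def gstep (l : List Int) (s : Int × Option Int) (x : Int) : Int × Option Int :=
  if (List.count x l : Int) > s.1 then ((List.count x l : Int), some x) else s

theorem gstep_fst_le (l : List Int) (s : Int × Option Int) (x : Int) :
    s.1 ≤ (gstep l s x).1 ∧ (List.count x l : Int) ≤ (gstep l s x).1 := by
  unfold gstep; split_ifs with h
  · exact ⟨le_of_lt h, le_refl _⟩
  · exact ⟨le_refl _, not_lt.mp h⟩

theorem gmax (l : List Int) (xs : List Int) : ∀ (s : Int × Option Int),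
    s.1 ≤ (xs.foldl (gstep l) s).1 ∧
    ∀ y ∈ xs, (List.count y l : Int) ≤ (xs.foldl (gstep l) s).1 := by
  induction xs with
  | nil => intro s; simp
  | cons x t ih =>
    intro s
    have h := ih (gstep l s x)
    refine ⟨le_trans (gstep_fst_le l s x).1 h.1, ?_⟩
    intro y hy
    rcases List.mem_cons.mp hy with rfl | hyt
    · exact le_trans (gstep_fst_le l s y).2 h.1
    · exact h.2 y hyt

-- duplicate elements never move the strict maximum: folding over the first-occurrence
-- dedup (the counter's key order) equals folding over the whole list
theorem gdedup (l : List Int) (xs : List Int) : ∀ (s : Int × Option Int),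
    (PySem.Set.ofList xs).foldl (gstep l) s = xs.foldl (gstep l) s := by
  induction xs using List.reverseRecOn with
  | nil => intro s; rfl
  | append_singleton t x ih =>
    intro s
    rw [PySem.Set.ofList_append_singleton, List.foldl_append]
    by_cases hx : x ∈ t
    · rw [PySem.Set.add_of_mem ((PySem.Set.mem_ofList t x).mpr hx), ih]
      have hle := (gmax l t s).2 x hx
      simp only [List.foldl_cons, List.foldl_nil]
      have hg : gstep l (t.foldl (gstep l) s) x = t.foldl (gstep l) s := by
        unfold gstep; exact if_neg (not_lt.mpr hle)
      rw [hg]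
    · rw [PySem.Set.add_of_not_mem (fun h => hx ((PySem.Set.mem_ofList t x).mp h)),
        List.foldl_append, ih]

-- B's per-column mode selection over a dict's items
def selD (d : PySem.Dict Int Int) : Int :=
  ((d.items.foldl
      (fun (s : Int × Option Int) kv => if kv.2 > s.1 then (kv.2, some kv.1) else s)
      (0, (none : Option Int))).2).getD 0

-- the per-column heart: A's quadratic scan equals B's counter-then-select
theorem colEq (l : List Int) : find_mode l = selD (PySem.Dict.counter l) := by
  unfold find_mode selD
  rw [PySem.Dict.items_counter, List.foldl_map]
  rw [PySem.List.foldl_pyRange_zero_pyGetD' l 0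
    (fun (s : Int × Option Int) x =>
      if (List.count x l : Int) > s.1 then ((List.count x l : Int), some x) else s)
    (0, (none : Option Int))]
  have h := gdedup l l (0, (none : Option Int))
  unfold gstep at h
  rw [← h]

-- one inner pass of B (the loop 'for i in range(n): counts[i][row[i]] += 1'), as a mapIdx
theorem setfold {D : Type} (d : D) (f : Int → D → D) :
    ∀ (n : Nat) (cs : List D), n ≤ cs.length →
    (PySem.List.pyRange 0 (n : Int) 1).foldl
        (fun cs i => PySem.List.pySetD cs i (f i (PySem.List.pyGetD cs i d))) cs
      = cs.mapIdx (fun i c => if i < n then f i c else c) := by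
  intro n
  induction n with
  | zero =>
    intro cs _
    rw [show ((0 : Nat) : Int) = 0 by rfl, PySem.List.pyRange_one_eq_nil (le_refl 0)]
    simp only [List.foldl_nil]
    refine (List.ext_getElem (by simp) ?_).symm
    intro i h1 h2
    simp
  | succ n ih =>
    intro cs hlen
    have hn : n ≤ cs.length := Nat.le_of_succ_le hlen
    have hcast : ((n + 1 : Nat) : Int) = (n : Int) + 1 := by push_cast; ring
    rw [hcast, PySem.List.pyRange_one_succ_right (by positivity), List.foldl_append]
    rw [ih cs hn]
    simp only [List.foldl_cons, List.foldl_nil]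
    set R := cs.mapIdx (fun i c => if i < n then f i c else c) with hR
    have hRlen : R.length = cs.length := by rw [hR]; exact List.length_mapIdx
    have hnR : n < R.length := by omega
    have hget : PySem.List.pyGetD R (n : Int) d = cs[n]'(by omega) := by
      rw [PySem.List.pyGetD_natCast, List.getD_eq_getElem?_getD, List.getElem?_eq_getElem hnR]
      simp only [Option.getD_some, hR, List.getElem_mapIdx]
      rw [if_neg (lt_irrefl n)]
    rw [PySem.List.pySetD_natCast, hget]
    refine List.ext_getElem (by simp [hR]) ?_
    intro i h1 h2
    have h2' : i < cs.length := by simpa using h2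
    rw [List.getElem_set]
    have hmap : (List.mapIdx (fun i c => if i < n + 1 then f (i : Int) c else c) cs)[i]'h2
        = if i < n + 1 then f (i : Int) (cs[i]'h2') else cs[i]'h2' := by
      simp only [List.getElem_mapIdx]
    rw [hmap]
    by_cases hin : n = i
    · subst hin
      rw [if_pos rfl, if_pos (by omega)]
    · rw [if_neg hin]
      have hRi : R[i]'(by omega) = if i < n then f (i : Int) (cs[i]'h2') else cs[i]'h2' := by
        simp only [hR, List.getElem_mapIdx]
      rw [hRi]
      by_cases hi : i < n
      · rw [if_pos hi, if_pos (by omega)]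
      · rw [if_neg hi, if_neg (by omega)]

-- loop interchange: B's row-major accumulation equals per-column counting folds
theorem outer (n : Nat) :
    ∀ (rows : List (List Int)) (cs : List (PySem.Dict Int Int)), cs.length = n →
    rows.foldl
        (fun cs row =>
          (PySem.List.pyRange 0 (n : Int) 1).foldl
            (fun cs i =>
              let x := PySem.List.pyGetD row i 0
              PySem.List.pySetD cs i
                ((PySem.List.pyGetD cs i PySem.Dict.empty).insert x
                  ((PySem.List.pyGetD cs i PySem.Dict.empty).getD x 0 + 1))) cs) cs
      = cs.mapIdx (fun i c =>
          (rows.map (fun r => PySem.List.pyGetD r (i : Int) 0)).foldl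
            (fun d x => d.insert x (d.getD x 0 + 1)) c) := by
  intro rows
  induction rows with
  | nil =>
    intro cs _
    simp only [List.foldl_nil, List.map_nil]
    refine (List.ext_getElem (by simp) ?_).symm
    intro i h1 h2; simp
  | cons r rs ih =>
    intro cs hlen
    simp only [List.foldl_cons]
    rw [setfold PySem.Dict.empty
      (fun i c => c.insert (PySem.List.pyGetD r i 0) (c.getD (PySem.List.pyGetD r i 0) 0 + 1))
      n cs (le_of_eq hlen.symm)]
    rw [ih _ (by rw [List.length_mapIdx]; exact hlen)]
    refine List.ext_getElem (by simp) ?_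
    intro i h1 h2
    simp only [List.getElem_mapIdx, List.map_cons, List.foldl_cons]
    have hcs : i < cs.length := by simpa using h2
    rw [if_pos (show i < n from hlen ▸ hcs)]

-- the two ports agree on every input (Pre_ is about faithfulness to the Pythons, which
-- raise outside it; the port-level equality needs no hypothesis)
theorem ports_eq (mylist : List (List Int)) : studen_mode mylist = studen_mode_alt mylist := by
  unfold studen_mode studen_mode_alt
  simp only []
  set n := (PySem.List.pyGetD mylist 0 []).length with hn
  rw [PySem.List.foldl_append_singleton_eq_map
    (fun i => find_mode ((PySem.List.pyRange 0 (mylist.length : Int) 1).foldl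
      (fun col j => col ++ [PySem.List.pyGetD (PySem.List.pyGetD mylist j []) i 0]) []))]
  rw [outer n mylist ((PySem.List.pyRange 0 (n : Int) 1).map (fun _ => PySem.Dict.empty))
    (by rw [List.length_map, PySem.List.length_pyRange_one]; omega)]
  rw [PySem.List.foldl_append_singleton_eq_map
    (fun c => ((PySem.Dict.items c).foldl
      (fun (s : Int × Option Int) kv => if kv.2 > s.1 then (kv.2, some kv.1) else s)
      (0, (none : Option Int))).2.getD 0)]
  simp only [List.nil_append]
  refine List.ext_getElem (by simp [PySem.List.length_pyRange_one]) ?_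
  intro k h1 h2
  have hk : k < n := by simpa [PySem.List.length_pyRange_one] using h1
  rw [List.getElem_map, List.getElem_map, List.getElem_mapIdx, List.getElem_map,
    PySem.List.getElem_pyRange_one]
  simp only [zero_add]
  -- A's inner column build is the column as a map
  rw [PySem.List.foldl_append_singleton_eq_map
    (fun j => PySem.List.pyGetD (PySem.List.pyGetD mylist j []) (k : Int) 0)]
  simp only [List.nil_append]
  have hcol : (PySem.List.pyRange 0 (mylist.length : Int) 1).map
      (fun j => PySem.List.pyGetD (PySem.List.pyGetD mylist j []) (k : Int) 0)
      = mylist.map (fun r => PySem.List.pyGetD r (k : Int) 0) := by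
    have := PySem.List.map_pyGetD_pyRange_zero' mylist ([] : List Int)
    calc (PySem.List.pyRange 0 (mylist.length : Int) 1).map
          (fun j => PySem.List.pyGetD (PySem.List.pyGetD mylist j []) (k : Int) 0)
        = ((PySem.List.pyRange 0 (mylist.length : Int) 1).map
            (fun j => PySem.List.pyGetD mylist j [])).map
            (fun r => PySem.List.pyGetD r (k : Int) 0) := by rw [List.map_map]; rfl
      _ = mylist.map (fun r => PySem.List.pyGetD r (k : Int) 0) := by rw [this]
  rw [hcol, PySem.Dict.foldl_insert_getD_add_one_eq_counter]
  exact colEq (mylist.map (fun r => PySem.List.pyGetD r (k : Int) 0))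

-- ===== VERDICT (by name: the statement is the Claim_ definition above) =====
theorem studen_mode_spec : Claim_equal_studen_mode := by
  intro mylist _ _
  unfold Spec_studen_mode
  exact ports_eq mylist
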